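-- pv_equiv track=rewrite | github.com/AKalaitan/multikeyNTRU | poly_lib.py | poly_mult
-- ===== SOURCE A (Python) =====
-- def poly_mult(f,g,q):
-- 	size = len(f)+len(g)-1
-- 	ans = [0]
-- 	for i in range(0,len(f)):
-- 		size -= 1
-- 		step_result = []
-- 		for j in range(0,len(g)):
-- 			step_result.append(modulo_reduction((f[i]*g[j]),q))
-- 		while j<size:
-- 			step_result.append(0)
-- 			j+=1
-- 		ans = poly_add(step_result,ans,q)
-- 	return ans
--
-- def poly_add(f1,g1,q):
-- 	f = f1[:]
-- 	g = g1[:]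
-- 	f.reverse()
-- 	g.reverse()
-- 	if len(f)>len(g):
-- 		for i in range(0,len(g)):
-- 			f[i] += g[i]
-- 			f[i] = modulo_reduction(f[i],q)
-- 		f.reverse()
-- 		g.reverse()
-- 		return f
-- 	else:
-- 		for i in range(0,len(f)):
-- 			g[i] += f[i]
-- 			g[i] = modulo_reduction(g[i],q)
-- 		f.reverse()
-- 		g.reverse()
-- 		return g
--
-- def modulo_reduction(f,q):
-- 	f = f%q
-- 	if (f>int(q/2)) : f -=q
-- 	return f
-- ===== SOURCE B (Python) =====
-- def poly_mult(f, g, q):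
--     # Output-centric: each coefficient is one window (anti-diagonal) sum of the
--     # raw convolution, reduced into the symmetric residue range once.
--     if not f:
--         return [0]
--     n, m = len(f), len(g)
--     half = int(q / 2)
--     out = []
--     for k in range(n + m - 1):
--         s = 0
--         for i in range(max(0, k - m + 1), min(n, k + 1)):
--             s += f[i] * g[k - i]
--         r = s % q
--         out.append(r - q if r > half else r)
--     return out
-- ===== Notes on version B (the rewrite author's own statement) =====
-- stated objective: faster
-- what changed: B computes each output coefficient directly as one anti-diagonal window sum of the raw convolution and reduces it into the symmetric residue range once, instead of building a zero-padded row list per f-coefficient and repeatedly merging rows with poly_add (list copies, reversals and a modular reduction per touched cell); Pre_ only excludes inputs where A raises (q=0, or g empty with f nonempty).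
import Mathlib
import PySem

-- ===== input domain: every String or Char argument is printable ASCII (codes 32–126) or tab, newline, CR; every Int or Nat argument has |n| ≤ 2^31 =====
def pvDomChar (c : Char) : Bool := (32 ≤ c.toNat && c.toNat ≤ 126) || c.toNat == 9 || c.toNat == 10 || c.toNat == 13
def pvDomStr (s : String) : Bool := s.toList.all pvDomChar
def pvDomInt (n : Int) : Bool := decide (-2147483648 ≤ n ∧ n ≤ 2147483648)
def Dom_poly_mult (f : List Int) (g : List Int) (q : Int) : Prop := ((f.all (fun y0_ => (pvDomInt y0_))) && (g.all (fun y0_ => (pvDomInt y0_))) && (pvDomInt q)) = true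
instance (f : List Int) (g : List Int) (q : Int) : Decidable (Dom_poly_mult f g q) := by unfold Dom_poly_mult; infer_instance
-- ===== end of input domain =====

-- B computes each output coefficient as one window sum of the raw convolution and reduces it
-- mod q once, instead of A's per-coefficient zero-padded rows merged by poly_add with repeated
-- reductions (measured constant-factor speedup; same O(n*m) asymptotics).

-- ===== PORT A =====
-- modulo_reduction(f, q); 'int(q/2)' truncates toward zero, = Int.tdiv on |q| ≤ 2^31 (exact on Dom)
def pvModRed (x q : Int) : Int :=
  let r := PySem.Int.mod x q
  if r > q.tdiv 2 then r - q else r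

-- the in-place addition loop of poly_add, running over the reversed lists (index 0 = tail);
-- iterates over the indices of the second (shorter) list
def pvAddInto (q : Int) : List Int → List Int → List Int
  | fr, [] => fr
  | [], _ => []
  | a :: as, b :: bs => pvModRed (a + b) q :: pvAddInto q as bs

def poly_add (f1 g1 : List Int) (q : Int) : List Int :=
  if f1.length > g1.length then (pvAddInto q f1.reverse g1.reverse).reverse
  else (pvAddInto q g1.reverse f1.reverse).reverse

-- the 'while j < size: step_result.append(0)' padding loop
def pvPadZeros (j size : Int) : List Int :=
  if j < size then 0 :: pvPadZeros (j + 1) size else []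
termination_by (size - j).toNat
decreasing_by omega

-- the main 'for i in range(0, len(f))' loop, carrying 'size' and 'ans'
def pvLoop (g : List Int) (q : Int) : List Int → Int → List Int → List Int
  | [], _, ans => ans
  | a :: rest, size, ans =>
    let size' := size - 1
    let step := g.map (fun b => pvModRed (a * b) q) ++ pvPadZeros ((g.length : Int) - 1) size'
    pvLoop g q rest size' (poly_add step ans q)

def poly_mult (f : List Int) (g : List Int) (q : Int) : List Int :=
  pvLoop g q f ((f.length : Int) + (g.length : Int) - 1) [0]

-- ===== PORT B =====
-- indices i, k-i are in range on every admitted input, so getD matches Python indexing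
def poly_mult_alt (f : List Int) (g : List Int) (q : Int) : List Int :=
  if f = [] then [0]
  else
    let n := f.length
    let m := g.length
    let half := q.tdiv 2   -- int(q/2), exact on |q| ≤ 2^31
    (List.range (n + m - 1)).map (fun k =>
      let s := (List.range' (k + 1 - m) (min n (k + 1) - (k + 1 - m))).foldl
        (fun s i => s + f.getD i 0 * g.getD (k - i) 0) 0
      let r := PySem.Int.mod s q
      if r > half then r - q else r)

-- ===== PRECONDITION & SPEC =====
-- Pre_ excludes exactly the inputs where A raises: q = 0 (ZeroDivisionError in
-- modulo_reduction) and g = [] with f ≠ [] (NameError: j unbound in the while loop).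
def Pre_poly_mult (f : List Int) (g : List Int) (q : Int) : Prop :=
  f = [] ∨ (g ≠ [] ∧ q ≠ 0)
instance (f : List Int) (g : List Int) (q : Int) : Decidable (Pre_poly_mult f g q) := by
  unfold Pre_poly_mult; infer_instance

def pvWitness_poly_mult : List Int × List Int × Int := ([1, 2], [3], 5)

def Spec_poly_mult (f : List Int) (g : List Int) (q : Int) (out : List Int) : Prop := out = poly_mult_alt f g q
instance (f : List Int) (g : List Int) (q : Int) (out : List Int) : Decidable (Spec_poly_mult f g q out) := by unfold Spec_poly_mult; infer_instance

-- ===== CLAIM (what is proved, stated in full; the proofs are below) =====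
def Claim_equal_poly_mult : Prop := ∀ (f : List Int) (g : List Int) (q : Int), Dom_poly_mult f g q → Pre_poly_mult f g q → Spec_poly_mult f g q (poly_mult f g q)

-- ===== LEMMAS AND PROOFS =====

-- symmetric reduction: congruence and residue lemmas ------------------------

theorem pvFmod_congr (x y q : Int) (h : x % q = y % q) : x.fmod q = y.fmod q := by
  have hxy : ((0:Int) ≤ q ∨ q ∣ x) ↔ ((0:Int) ≤ q ∨ q ∣ y) := by
    constructor
    · rintro (h0 | hx)
      · exact Or.inl h0
      · exact Or.inr (Int.dvd_of_emod_eq_zero (by rw [← h]; exact Int.emod_eq_zero_of_dvd hx))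
    · rintro (h0 | hy)
      · exact Or.inl h0
      · exact Or.inr (Int.dvd_of_emod_eq_zero (by rw [h]; exact Int.emod_eq_zero_of_dvd hy))
  rw [Int.fmod_eq_emod, Int.fmod_eq_emod, h]
  by_cases hc : (0:Int) ≤ q ∨ q ∣ y
  · rw [if_pos (hxy.mpr hc), if_pos hc]
  · rw [if_neg (fun hx => hc (hxy.mp hx)), if_neg hc]

theorem pvModRed_congr (x y q : Int) (h : x % q = y % q) : pvModRed x q = pvModRed y q := by
  unfold pvModRed
  simp only [PySem.Int.mod]
  rw [pvFmod_congr x y q h]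

theorem pvModRed_emod (x q : Int) : pvModRed x q % q = x % q := by
  unfold pvModRed
  simp only [PySem.Int.mod]
  have h1 : x.fmod q % q = x % q := by
    rw [Int.fmod_eq_emod]
    split_ifs
    · rw [add_zero]; exact Int.emod_emod_of_dvd x (dvd_refl q)
    · rw [Int.add_emod_right]; exact Int.emod_emod_of_dvd x (dvd_refl q)
  split_ifs
  · rw [Int.sub_emod_right, h1]
  · exact h1

-- tail-aligned reduced addition (both branches of poly_add) -----------------

def pvOv (q : Int) : List Int → List Int → List Int
  | [], v => v
  | u, [] => u
  | x :: xs, y :: ys => pvModRed (x + y) q :: pvOv q xs ys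

-- plain tail-aligned integer addition (no reduction)
def pvPadd : List Int → List Int → List Int
  | [], v => v
  | u, [] => u
  | x :: xs, y :: ys => (x + y) :: pvPadd xs ys

theorem pvOv_nil (q : Int) (u : List Int) : pvOv q u [] = u := by
  cases u <;> rfl

theorem pvOv_comm (q : Int) : ∀ u v : List Int, pvOv q u v = pvOv q v u := by
  intro u
  induction u with
  | nil => intro v; cases v <;> rfl
  | cons x xs ih =>
    intro v
    cases v with
    | nil => rfl
    | cons y ys => simp only [pvOv, ih, add_comm]

theorem pvAddInto_eq_ov (q : Int) : ∀ u v : List Int, v.length ≤ u.length →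
    pvAddInto q u v = pvOv q u v := by
  intro u
  induction u with
  | nil =>
    intro v h
    cases v with
    | nil => rfl
    | cons b bs => simp at h
  | cons a as ih =>
    intro v h
    cases v with
    | nil => rfl
    | cons b bs =>
      simp only [pvAddInto, pvOv]
      rw [ih bs (by simpa using h)]

theorem pvPolyAdd_eq (q : Int) (f1 g1 : List Int) :
    poly_add f1 g1 q = (pvOv q f1.reverse g1.reverse).reverse := by
  unfold poly_add
  split_ifs with h
  · rw [pvAddInto_eq_ov q _ _ (by simpa using Nat.le_of_lt h)]
  · rw [pvAddInto_eq_ov q _ _ (by simpa using Nat.le_of_not_lt h), pvOv_comm]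

theorem pvPadZeros_eq (j size : Int) : pvPadZeros j size = List.replicate (size - j).toNat 0 := by
  rw [pvPadZeros]
  split_ifs with h
  · rw [pvPadZeros_eq (j + 1) size]
    have he : (size - j).toNat = (size - (j + 1)).toNat + 1 := by omega
    rw [he, List.replicate_succ]
  · have he : (size - j).toNat = 0 := by omega
    rw [he, List.replicate]
termination_by (size - j).toNat
decreasing_by omega

-- the reversed main loop ----------------------------------------------------

def pvGo (g : List Int) (q : Int) : List Int → List Int → List Int
  | [], acc => acc
  | a :: rest, acc =>
    pvGo g q rest
      (pvOv q (List.replicate rest.length 0 ++ g.reverse.map (fun b => pvModRed (a * b) q)) acc)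

theorem pvLoop_eq_go (g : List Int) (q : Int) :
    ∀ (fs : List Int) (ans : List Int),
      pvLoop g q fs ((fs.length : Int) + (g.length : Int) - 1) ans = (pvGo g q fs ans.reverse).reverse := by
  intro fs
  induction fs with
  | nil => intro ans; simp [pvLoop, pvGo]
  | cons a rest ih =>
    intro ans
    simp only [pvLoop, pvGo]
    have hsz : ((a :: rest).length : Int) + (g.length : Int) - 1 - 1
        = (rest.length : Int) + (g.length : Int) - 1 := by
      simp only [List.length_cons]
      push_cast
      ring
    rw [hsz]
    have hpad : pvPadZeros ((g.length : Int) - 1) ((rest.length : Int) + (g.length : Int) - 1)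
        = List.replicate rest.length 0 := by
      rw [pvPadZeros_eq]
      congr 1
      omega
    rw [hpad, ih]
    congr 2
    rw [pvPolyAdd_eq, List.reverse_reverse, List.reverse_append,
      List.reverse_replicate, ← List.map_reverse]

-- core: reduced tail-aligned merge of congruent lists -----------------------

theorem pvOvRed (q : Int) : ∀ (u u' v v' : List Int),
    List.Forall₂ (fun x y => x % q = y % q) u u' →
    List.Forall₂ (fun x y => x % q = y % q) v v' →
    v.drop u.length = (v'.drop u.length).map (fun x => pvModRed x q) →
    u.length ≤ v.length →
    pvOv q u v = (pvPadd u' v').map (fun x => pvModRed x q) := by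
  intro u
  induction u with
  | nil =>
    intro u' v v' h1 h2 h3 _
    cases h1
    simpa [pvOv, pvPadd] using h3
  | cons x xs ih =>
    intro u' v v' h1 h2 h3 h4
    cases h1 with
    | @cons _ x' _ xs' hx hxs =>
      cases h2 with
      | nil => simp at h4
      | @cons y y' ys ys' hy hys =>
        simp only [pvOv, pvPadd, List.map_cons]
        congr 1
        · exact pvModRed_congr _ _ _ (by rw [Int.add_emod, hx, hy, ← Int.add_emod])
        · exact ih _ _ _ hxs hys (by simpa using h3) (by simpa using h4)

-- raw accumulated rows ------------------------------------------------------

def pvS (g : List Int) : List Int → List Int → List Int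
  | [], c => c
  | a :: rest, c =>
    pvS g rest (pvPadd (List.replicate rest.length 0 ++ g.reverse.map (fun b => a * b)) c)

theorem pvPadd_length : ∀ u v : List Int, (pvPadd u v).length = max u.length v.length := by
  intro u
  induction u with
  | nil => intro v; simp [pvPadd]
  | cons x xs ih =>
    intro v
    cases v with
    | nil => simp [pvPadd]
    | cons y ys =>
      simp only [pvPadd, List.length_cons, ih]
      omega

theorem pvForall₂_append {R : Int → Int → Prop} :
    ∀ {l1 l2 l3 l4 : List Int}, List.Forall₂ R l1 l2 → List.Forall₂ R l3 l4 →
      List.Forall₂ R (l1 ++ l3) (l2 ++ l4) := by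
  intro l1 l2 l3 l4 h1 h2
  induction h1 with
  | nil => simpa
  | cons hx _ ih => exact List.Forall₂.cons hx ih

theorem pvForall₂_meq_refl (q : Int) (l : List Int) :
    List.Forall₂ (fun x y => x % q = y % q) l l :=
  List.forall₂_same.2 (fun _ _ => rfl)

theorem pvForall₂_meq_mapRed (q : Int) (h : Int → Int) (l : List Int) :
    List.Forall₂ (fun x y => x % q = y % q) (l.map (fun b => pvModRed (h b) q)) (l.map h) := by
  induction l with
  | nil => exact List.Forall₂.nil
  | cons b bs ih => exact List.Forall₂.cons (pvModRed_emod _ _) ih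

theorem pvForall₂_meq_red_self (q : Int) (l : List Int) :
    List.Forall₂ (fun x y => x % q = y % q) (l.map (fun x => pvModRed x q)) l := by
  induction l with
  | nil => exact List.Forall₂.nil
  | cons b bs ih => exact List.Forall₂.cons (pvModRed_emod _ _) ih

theorem pvGoRed (g : List Int) (q : Int) :
    ∀ (fs c : List Int), fs.length + g.length ≤ c.length + 1 →
      pvGo g q fs (c.map (fun x => pvModRed x q)) = (pvS g fs c).map (fun x => pvModRed x q) := by
  intro fs
  induction fs with
  | nil => intro c _; rfl
  | cons a rest ih =>
    intro c h
    simp only [pvGo, pvS]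
    have hlen : (List.replicate rest.length 0
        ++ g.reverse.map (fun b => pvModRed (a * b) q)).length ≤ (c.map (fun x => pvModRed x q)).length := by
      simp at h ⊢
      omega
    have hov : pvOv q (List.replicate rest.length 0 ++ g.reverse.map (fun b => pvModRed (a * b) q))
        (c.map (fun x => pvModRed x q))
        = (pvPadd (List.replicate rest.length 0 ++ g.reverse.map (fun b => a * b)) c).map
            (fun x => pvModRed x q) := by
      apply pvOvRed q _ _ _ _ ?_ (pvForall₂_meq_red_self q c) ?_ hlen
      · exact pvForall₂_append (pvForall₂_meq_refl q _) (pvForall₂_meq_mapRed q _ _)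
      · rw [List.map_drop]
    rw [hov, ih]
    rw [pvPadd_length]
    simp at h ⊢
    omega

-- pointwise characterisation ------------------------------------------------

theorem pvPadd_getD : ∀ (u v : List Int) (p : Nat),
    (pvPadd u v).getD p 0 = u.getD p 0 + v.getD p 0 := by
  intro u
  induction u with
  | nil => intro v p; simp [pvPadd]
  | cons x xs ih =>
    intro v p
    cases v with
    | nil => simp [pvPadd]
    | cons y ys =>
      cases p with
      | zero => simp [pvPadd]
      | succ p => simpa [pvPadd] using ih ys p

def pvRowsum (g : List Int) : List Int → Nat → Int
  | [], _ => 0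
  | a :: rest, p =>
    (List.replicate rest.length 0 ++ g.reverse.map (fun b => a * b)).getD p 0 + pvRowsum g rest p

theorem pvS_getD (g : List Int) : ∀ (fs c : List Int) (p : Nat),
    (pvS g fs c).getD p 0 = c.getD p 0 + pvRowsum g fs p := by
  intro fs
  induction fs with
  | nil => intro c p; simp [pvS, pvRowsum]
  | cons a rest ih =>
    intro c p
    simp only [pvS, pvRowsum]
    rw [ih, pvPadd_getD]
    ring

theorem pvS_length (g : List Int) : ∀ (fs c : List Int),
    fs.length + g.length ≤ c.length + 1 → (pvS g fs c).length = c.length := by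
  intro fs
  induction fs with
  | nil => intro c _; rfl
  | cons a rest ih =>
    intro c h
    simp only [pvS]
    rw [ih _ (by rw [pvPadd_length]; simp at h ⊢; omega), pvPadd_length]
    simp at h ⊢
    omega

-- closed form of one raw row ------------------------------------------------

theorem pvRow_getD (g : List Int) (a : Int) (s p : Nat) :
    (List.replicate s 0 ++ g.reverse.map (fun b => a * b)).getD p 0 =
      if s ≤ p ∧ p - s < g.length then a * g.getD (g.length - 1 - (p - s)) 0 else 0 := by
  by_cases hs : p < s
  · rw [if_neg (by omega)]
    rw [List.getD, List.getElem?_append_left (l₁ := List.replicate s 0) (by simpa using hs)]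
    simp [hs]
  · by_cases hm : p - s < g.length
    · rw [if_pos ⟨by omega, hm⟩]
      have hrev : p - s < g.reverse.length := by simpa using hm
      rw [List.getD, List.getElem?_append_right (by simpa using Nat.le_of_not_lt hs)]
      simp only [List.length_replicate, List.getElem?_map]
      rw [List.getElem?_eq_getElem hrev, List.getElem_reverse]
      simp only [Option.map_some, Option.getD_some]
      rw [List.getD_eq_getElem g 0 (by omega)]
    · rw [if_neg (by omega)]
      rw [List.getD, List.getElem?_append_right (by simpa using Nat.le_of_not_lt hs)]
      simp only [List.length_replicate, List.getElem?_map]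
      rw [List.getElem?_eq_none (by simpa using Nat.le_of_not_lt hm)]
      rfl

theorem pvRowsum_eq (g : List Int) : ∀ (fs : List Int) (p : Nat),
    pvRowsum g fs p = ∑ i ∈ Finset.range fs.length,
      (if fs.length - 1 - i ≤ p ∧ p - (fs.length - 1 - i) < g.length
       then fs.getD i 0 * g.getD (g.length - 1 - (p - (fs.length - 1 - i))) 0 else 0) := by
  intro fs
  induction fs with
  | nil => intro p; simp [pvRowsum]
  | cons a rest ih =>
    intro p
    simp only [pvRowsum, List.length_cons]
    rw [ih, Finset.sum_range_succ']
    have hhead : (List.replicate rest.length 0 ++ g.reverse.map (fun b => a * b)).getD p 0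
        = (if rest.length + 1 - 1 - 0 ≤ p ∧ p - (rest.length + 1 - 1 - 0) < g.length
           then (a :: rest).getD 0 0 * g.getD (g.length - 1 - (p - (rest.length + 1 - 1 - 0))) 0
           else 0) := by
      rw [pvRow_getD]
      have h0 : rest.length + 1 - 1 - 0 = rest.length := by omega
      rw [h0, List.getD_cons_zero]
    have htail : (∑ i ∈ Finset.range rest.length,
          if rest.length - 1 - i ≤ p ∧ p - (rest.length - 1 - i) < g.length
          then rest.getD i 0 * g.getD (g.length - 1 - (p - (rest.length - 1 - i))) 0 else 0)
        = ∑ i ∈ Finset.range rest.length,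
          if rest.length + 1 - 1 - (i + 1) ≤ p ∧ p - (rest.length + 1 - 1 - (i + 1)) < g.length
          then (a :: rest).getD (i + 1) 0
            * g.getD (g.length - 1 - (p - (rest.length + 1 - 1 - (i + 1)))) 0 else 0 := by
      apply Finset.sum_congr rfl
      intro i _
      have h1 : rest.length + 1 - 1 - (i + 1) = rest.length - 1 - i := by omega
      rw [h1, List.getD_cons_succ]
    rw [hhead, htail]
    ring

-- A characterised -----------------------------------------------------------

theorem pvDropRow (q : Int) (c0 : Int) (s m' : Nat) (ha : Int → Int) (G : List Int) :
    (c0 :: (List.replicate s 0 ++ G.map (fun x => pvModRed (ha x) q))).drop ((s + m') + 1)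
      = (((0:Int) :: (List.replicate s 0 ++ G.map ha)).drop ((s + m') + 1)).map
          (fun x => pvModRed x q) := by
  rw [List.drop_succ_cons, List.drop_succ_cons, List.drop_append, List.drop_append]
  have h0 : s - (s + m') = 0 := by omega
  have h1 : s + m' - s = m' := by omega
  simp only [List.length_replicate, List.drop_replicate, h0, h1, List.replicate_zero,
    List.nil_append, ← List.map_drop, List.map_map]
  rfl

theorem pvA_eq (a : Int) (fs g : List Int) (q : Int) (hg : g ≠ []) :
    poly_mult (a :: fs) g q =
      ((pvS g fs (List.replicate fs.length 0 ++ g.reverse.map (fun b => a * b))).map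
        (fun x => pvModRed x q)).reverse := by
  obtain ⟨m', hm⟩ : ∃ m', g.length = m' + 1 := by
    cases g with
    | nil => exact absurd rfl hg
    | cons _ t => exact ⟨t.length, rfl⟩
  unfold poly_mult
  rw [pvLoop_eq_go]
  rw [show ([0] : List Int).reverse = [0] from rfl]
  cases fs with
  | nil =>
    simp only [pvGo, List.length_nil, List.replicate_zero, List.nil_append, pvS]
    rw [pvOv_comm q _ [0]]
    have hov := pvOvRed q [0] [0] (g.reverse.map (fun b => pvModRed (a * b) q))
      (g.reverse.map (fun b => a * b)) (pvForall₂_meq_refl q [0])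
      (pvForall₂_meq_mapRed q _ _)
      (by simp only [List.length_cons, List.length_nil, ← List.map_drop, List.map_map]; rfl)
      (by simp; omega)
    rw [hov]
    congr 1
    cases hgr : g.reverse.map (fun b => a * b) with
    | nil => exfalso; apply hg; simpa using hgr
    | cons z zs => simp [pvPadd]
  | cons b fs' =>
    simp only [pvGo, pvS, List.length_cons, List.replicate_succ, List.cons_append]
    have hacc1 : pvOv q (0 :: (List.replicate fs'.length 0
          ++ g.reverse.map (fun x => pvModRed (a * x) q))) [0]
        = pvModRed (0 + 0) q :: (List.replicate fs'.length 0
          ++ g.reverse.map (fun x => pvModRed (a * x) q)) := by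
      simp only [pvOv, pvOv_nil]
    rw [hacc1]
    have hul : (List.replicate fs'.length 0
        ++ g.reverse.map (fun x => pvModRed (b * x) q)).length = (fs'.length + m') + 1 := by
      simp only [List.length_append, List.length_replicate, List.length_map,
        List.length_reverse, hm]
      omega
    have hov : pvOv q (List.replicate fs'.length 0 ++ g.reverse.map (fun x => pvModRed (b * x) q))
        (pvModRed (0 + 0) q :: (List.replicate fs'.length 0
          ++ g.reverse.map (fun x => pvModRed (a * x) q)))
        = (pvPadd (List.replicate fs'.length 0 ++ g.reverse.map (fun x => b * x))
            (0 :: (List.replicate fs'.length 0 ++ g.reverse.map (fun x => a * x)))).map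
            (fun x => pvModRed x q) := by
      apply pvOvRed q _ _ _ _ ?h1 ?h2 ?h3 ?h4
      case h1 => exact pvForall₂_append (pvForall₂_meq_refl q _) (pvForall₂_meq_mapRed q _ _)
      case h2 =>
        apply List.Forall₂.cons
        · rw [pvModRed_emod]; norm_num
        · exact pvForall₂_append (pvForall₂_meq_refl q _) (pvForall₂_meq_mapRed q _ _)
      case h3 => rw [hul]; exact pvDropRow q _ fs'.length m' _ g.reverse
      case h4 => simp [hm]
    rw [hov, pvGoRed g q fs' _ (by rw [pvPadd_length]; simp [hm]; omega)]

-- B characterised and the window sums ---------------------------------------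

theorem pvFoldl_add (h : Nat → Int) : ∀ (l : List Nat) (s : Int),
    l.foldl (fun s i => s + h i) s = s + (l.map h).sum := by
  intro l
  induction l with
  | nil => intro s; simp
  | cons x xs ih => intro s; simp [ih, add_assoc]

theorem pvSum_range_list (h : Nat → Int) : ∀ n : Nat,
    ((List.range n).map h).sum = ∑ i ∈ Finset.range n, h i := by
  intro n
  induction n with
  | zero => simp
  | succ n ih => rw [List.range_succ, Finset.sum_range_succ]; simp [ih]

theorem pvWsum_eq (f g : List Int) (k : Nat) :
    ((List.range' (k + 1 - g.length) (min f.length (k + 1) - (k + 1 - g.length))).foldl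
        (fun s i => s + f.getD i 0 * g.getD (k - i) 0) 0)
      = ∑ i ∈ Finset.Ico (k + 1 - g.length) (min f.length (k + 1)),
          f.getD i 0 * g.getD (k - i) 0 := by
  rw [pvFoldl_add, zero_add, List.range'_eq_map_range, List.map_map,
    pvSum_range_list, Finset.sum_Ico_eq_sum_range]
  rfl

-- final assembly -------------------------------------------------------------

theorem pvMain (a : Int) (fs g : List Int) (q : Int) (hg : g ≠ []) :
    poly_mult (a :: fs) g q = poly_mult_alt (a :: fs) g q := by
  have hg1 : 1 ≤ g.length := by
    cases g with
    | nil => exact absurd rfl hg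
    | cons _ _ => simp
  rw [pvA_eq a fs g q hg]
  have hB : poly_mult_alt (a :: fs) g q = (List.range ((a :: fs).length + g.length - 1)).map
      (fun k => pvModRed (((List.range' (k + 1 - g.length)
          (min (a :: fs).length (k + 1) - (k + 1 - g.length))).foldl
        (fun s i => s + (a :: fs).getD i 0 * g.getD (k - i) 0) 0)) q) := by
    rfl
  rw [hB]
  have hXlen : (pvS g fs (List.replicate fs.length 0 ++ g.reverse.map (fun b => a * b))).length
      = fs.length + g.length := by
    rw [pvS_length g fs _ (by simp)]
    simp
  apply List.ext_getElem
  · simp only [List.length_reverse, List.length_map, hXlen, List.length_range, List.length_cons]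
    omega
  · intro k h1 h2
    have hk : k < fs.length + g.length := by
      simpa only [List.length_reverse, List.length_map, hXlen] using h1
    rw [List.getElem_reverse, List.getElem_map, List.getElem_map, List.getElem_range]
    simp only [List.length_map]
    have hplt : (pvS g fs (List.replicate fs.length 0
        ++ g.reverse.map (fun b => a * b))).length - 1 - k
        < (pvS g fs (List.replicate fs.length 0 ++ g.reverse.map (fun b => a * b))).length := by
      rw [hXlen]; omega
    rw [← List.getD_eq_getElem _ 0 hplt, hXlen]
    set p := fs.length + g.length - 1 - k with hp
    have hSg : (pvS g fs (List.replicate fs.length 0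
        ++ g.reverse.map (fun b => a * b))).getD p 0 = pvRowsum g (a :: fs) p := by
      rw [pvS_getD, pvRowsum]
    rw [hSg, pvRowsum_eq, pvWsum_eq]
    congr 1
    rw [← Finset.sum_filter]
    have hset : Finset.filter
          (fun i => (a :: fs).length - 1 - i ≤ p ∧ p - ((a :: fs).length - 1 - i) < g.length)
          (Finset.range (a :: fs).length)
        = Finset.Ico (k + 1 - g.length) (min (a :: fs).length (k + 1)) := by
      ext i
      simp only [Finset.mem_filter, Finset.mem_range, Finset.mem_Ico, List.length_cons]
      omega
    rw [hset]
    apply Finset.sum_congr rfl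
    intro i hi
    rw [Finset.mem_Ico] at hi
    have hidx : g.length - 1 - (p - ((a :: fs).length - 1 - i)) = k - i := by
      simp only [List.length_cons] at hi ⊢
      omega
    rw [hidx]

-- ===== VERDICT (by name: the statement is the Claim_ definition above) =====
theorem poly_mult_spec : Claim_equal_poly_mult := by
  intro f g q _ hpre
  unfold Spec_poly_mult
  rcases hpre with hf | ⟨hg, _⟩
  · subst hf; rfl
  · cases f with
    | nil => rfl
    | cons a fs => exact pvMain a fs g q hg
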